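-- pv_equiv track=rewrite | github.com/ppal885/youtubesummarizer | app/services/export_notes_markdown.py | _neutralize_line_headings
-- ===== SOURCE A (Python) =====
-- def _neutralize_line_headings(text: str) -> str:
--     """Prefix lines that look like ATX headings so user content cannot break section structure."""
--     out_lines: list[str] = []
--     for line in text.split("\n"):
--         stripped = line.lstrip()
--         if stripped.startswith("#"):
--             indent_len = len(line) - len(stripped)
--             out_lines.append(f"{line[:indent_len]}\\{stripped}")
--         else:
--             out_lines.append(line)
--     return "\n".join(out_lines)
-- ===== SOURCE B (Python) =====
-- def _neutralize_line_headings(text: str) -> str: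
--     """Single pass over the characters: track whether we are still in a line's
--     leading whitespace; escape a '#' seen there. No split/join of lines."""
--     out = []
--     leading = True
--     for ch in text:
--         if leading and ch == "#":
--             out.append("\\")
--         out.append(ch)
--         if ch == "\n":
--             leading = True
--         elif leading and not ch.isspace():
--             leading = False
--     return "".join(out)
-- ===== Notes on version B (the rewrite author's own statement) =====
-- stated objective: alternative
-- what changed: Replaced the per-line split, lstrip, rebuild and join pipeline with a single character-by-character pass that tracks a leading-whitespace flag and inserts the backslash in place.
import Mathlib
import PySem

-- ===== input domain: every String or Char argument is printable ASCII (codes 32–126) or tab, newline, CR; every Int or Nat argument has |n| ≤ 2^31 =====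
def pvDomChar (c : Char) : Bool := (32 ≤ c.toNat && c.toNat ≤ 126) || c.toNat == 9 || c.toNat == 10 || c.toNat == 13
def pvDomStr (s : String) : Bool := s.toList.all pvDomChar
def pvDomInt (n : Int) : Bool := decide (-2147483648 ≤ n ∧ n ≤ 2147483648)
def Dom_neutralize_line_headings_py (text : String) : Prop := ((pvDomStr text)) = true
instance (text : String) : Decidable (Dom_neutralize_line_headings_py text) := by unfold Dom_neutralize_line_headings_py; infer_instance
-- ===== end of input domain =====

-- B replaces the split/lstrip/per-line-rebuild/join pipeline of A by a single
-- character pass with a leading-whitespace flag (objective: alternative).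

-- ===== PORT A =====
def neutralize_line_headings_py (text : String) : String :=
  let out_lines := (PySem.Chars.splitOn text.toList ['\n']).foldl
    (fun (out_lines : List (List Char)) line =>
      let stripped := PySem.Chars.lstrip line
      if PySem.Chars.startswith stripped ['#'] then
        let indent_len : Int := (PySem.Chars.len line : Int) - (PySem.Chars.len stripped : Int)
        out_lines ++ [PySem.List.slice line none (some indent_len) ++ '\\' :: stripped]
      else
        out_lines ++ [line]) []
  String.ofList (PySem.Chars.join ['\n'] out_lines)

-- ===== PORT B =====
def pvStepB (st : List Char × Bool) (ch : Char) : List Char × Bool :=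
  let out := if st.2 && (ch == '#') then st.1 ++ ['\\'] else st.1
  let out := out ++ [ch]
  let leading := if ch == '\n' then true
                 else if st.2 && !(PySem.Chars.isspace ch) then false else st.2
  (out, leading)

def neutralize_line_headings_py_alt (text : String) : String :=
  String.ofList (text.toList.foldl pvStepB ([], true)).1

-- ===== PRECONDITION & SPEC =====
def Spec_neutralize_line_headings_py (text : String) (out : String) : Prop := out = neutralize_line_headings_py_alt text
instance (text : String) (out : String) : Decidable (Spec_neutralize_line_headings_py text out) := by unfold Spec_neutralize_line_headings_py; infer_instance

-- ===== CLAIM (what is proved, stated in full; the proofs are below) =====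
def Claim_equal_neutralize_line_headings_py : Prop := ∀ (text : String), Dom_neutralize_line_headings_py text → Spec_neutralize_line_headings_py text (neutralize_line_headings_py text)

-- ===== LEMMAS AND PROOFS =====

lemma pvFold_hom (l : List Char) : ∀ (acc : List Char) (b : Bool),
    l.foldl pvStepB (acc, b) =
      (acc ++ (l.foldl pvStepB ([], b)).1, (l.foldl pvStepB ([], b)).2) := by
  induction l with
  | nil => intro acc b; simp
  | cons c r ih =>
    intro acc b
    simp only [List.foldl_cons]
    rw [show pvStepB (acc, b) c = (acc ++ (pvStepB ([], b) c).1, (pvStepB ([], b) c).2) by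
      simp only [pvStepB]; split <;> simp]
    rw [ih ((acc ++ (pvStepB ([], b) c).1)) _, ih (pvStepB ([], b) c).1]
    cases h : pvStepB ([], b) c
    simp

lemma pvFold_false (l : List Char) : ∀ (acc : List Char), '\n' ∉ l →
    l.foldl pvStepB (acc, false) = (acc ++ l, false) := by
  induction l with
  | nil => intro acc _; simp
  | cons c r ih =>
    intro acc h
    simp only [List.foldl_cons]
    have hc : c ≠ '\n' := by rintro rfl; simp at h
    rw [show pvStepB (acc, false) c = (acc ++ [c], false) by simp [pvStepB, hc]]
    rw [ih _ (by simp at h; exact h.2)]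
    simp

def pvF (line : List Char) : List Char :=
  let stripped := PySem.Chars.lstrip line
  if PySem.Chars.startswith stripped ['#'] then
    line.take (line.length - stripped.length) ++ '\\' :: stripped
  else line

lemma pvLstrip_len_le (l : List Char) : (PySem.Chars.lstrip l).length ≤ l.length := by
  simp [PySem.Chars.lstrip]; exact List.length_dropWhile_le _ _

lemma pvFold_line (l : List Char) (h : '\n' ∉ l) :
    (l.foldl pvStepB ([], true)).1 = pvF l := by
  induction l with
  | nil => simp [pvF, PySem.Chars.lstrip, PySem.Chars.startswith]
  | cons c r ih =>
    have hc : c ≠ '\n' := by rintro rfl; simp at h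
    have hr : '\n' ∉ r := by simp at h; exact h.2
    by_cases hs : PySem.Chars.isspace c = true
    · have hch : c ≠ '#' := by rintro rfl; simp [PySem.Chars.isspace] at hs
      have hstep : pvStepB ([], true) c = ([c], true) := by
        simp [pvStepB, hc, hch, hs]
      simp only [List.foldl_cons, hstep]
      rw [pvFold_hom r [c] true, ih hr]
      have hl : PySem.Chars.lstrip (c :: r) = PySem.Chars.lstrip r := by
        simp [PySem.Chars.lstrip, hs]
      simp only [pvF, hl]
      split
      · have := pvLstrip_len_le r
        have htake : (c :: r).length - (PySem.Chars.lstrip r).length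
            = (r.length - (PySem.Chars.lstrip r).length) + 1 := by
          simp only [List.length_cons]; omega
        rw [htake, List.take_succ_cons]; simp
      · simp
    · have hstrip : PySem.Chars.lstrip (c :: r) = c :: r := by
        simp [PySem.Chars.lstrip, hs]
      by_cases hch : c = '#'
      · subst hch
        have hstep : pvStepB ([], true) '#' = (['\\', '#'], false) := by
          simp [pvStepB, hs]
        simp only [List.foldl_cons, hstep, pvFold_false r _ hr]
        simp [pvF, hstrip, PySem.Chars.startswith]
      · have hstep : pvStepB ([], true) c = ([c], false) := by
          simp [pvStepB, hc, hch, hs]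
        simp only [List.foldl_cons, hstep, pvFold_false r _ hr]
        have : PySem.Chars.startswith (PySem.Chars.lstrip (c :: r)) ['#'] = false := by
          simp only [hstrip, PySem.Chars.startswith, List.isPrefixOf, Bool.and_eq_false_iff,
            beq_eq_false_iff_ne, ne_eq]
          exact Or.inl fun e => hch e.symm
        simp [pvF, this]

def pvLines : List Char → List (List Char)
  | [] => [[]]
  | c :: r =>
    if c = '\n' then [] :: pvLines r
    else match pvLines r with
      | [] => [[c]]
      | p :: ps => (c :: p) :: ps

lemma pvLines_ne_nil (l : List Char) : pvLines l ≠ [] := by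
  cases l with
  | nil => simp [pvLines]
  | cons c r =>
    simp only [pvLines]
    split
    · simp
    · split <;> simp_all

lemma pvGo_eq (fuel : Nat) : ∀ (l cur : List Char) (parts : List (List Char)),
    l.length < fuel →
    PySem.Chars.splitOn.go ['\n'] fuel l cur parts =
      parts.reverse ++ (match pvLines l with
        | [] => []
        | p :: ps => (cur.reverse ++ p) :: ps) := by
  induction fuel with
  | zero => intro l cur parts h; omega
  | succ n ih =>
    intro l cur parts h
    cases l with
    | nil =>
      simp [PySem.Chars.splitOn.go, pvLines]
    | cons c rest =>
      by_cases hc : c = '\n'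
      · subst hc
        have hpre : List.isPrefixOf ['\n'] ('\n' :: rest) = true := by
          simp [List.isPrefixOf]
        rw [show PySem.Chars.splitOn.go ['\n'] (n+1) ('\n' :: rest) cur parts
            = PySem.Chars.splitOn.go ['\n'] n (List.drop (List.length ['\n']) ('\n' :: rest)) []
                (cur.reverse :: parts) by
          simp [PySem.Chars.splitOn.go, hpre]]
        simp only [List.length_singleton, List.drop_succ_cons, List.drop_zero]
        rw [ih rest [] (cur.reverse :: parts) (by simpa using Nat.lt_of_succ_lt_succ h)]
        cases hr : pvLines rest with
        | nil => exact absurd hr (pvLines_ne_nil rest)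
        | cons p ps => simp [pvLines, hr]
      · have hpre : List.isPrefixOf ['\n'] (c :: rest) = false := by
          simp [List.isPrefixOf]; exact fun e => hc e.symm
        rw [show PySem.Chars.splitOn.go ['\n'] (n+1) (c :: rest) cur parts
            = PySem.Chars.splitOn.go ['\n'] n rest (c :: cur) parts by
          simp [PySem.Chars.splitOn.go, hpre]]
        rw [ih rest (c :: cur) parts (by simpa using Nat.lt_of_succ_lt_succ h)]
        cases hr : pvLines rest with
        | nil => exact absurd hr (pvLines_ne_nil rest)
        | cons p ps => simp [pvLines, hr, hc]

lemma pvSplitOn_eq_lines (cs : List Char) :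
    PySem.Chars.splitOn cs ['\n'] = pvLines cs := by
  rw [PySem.Chars.splitOn, pvGo_eq (cs.length + 1) cs [] [] (Nat.lt_succ_self _)]
  cases hr : pvLines cs with
  | nil => exact absurd hr (pvLines_ne_nil cs)
  | cons p ps => simp

lemma pvLines_no_nl (l : List Char) (h : '\n' ∉ l) : pvLines l = [l] := by
  induction l with
  | nil => simp [pvLines]
  | cons c r ih =>
    have hc : c ≠ '\n' := by rintro rfl; simp at h
    have hr : '\n' ∉ r := by simp at h; exact h.2
    simp [pvLines, hc, ih hr]

lemma pvLines_append (l rest : List Char) (h : '\n' ∉ l) :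
    pvLines (l ++ '\n' :: rest) = l :: pvLines rest := by
  induction l with
  | nil => simp [pvLines]
  | cons c r ih =>
    have hc : c ≠ '\n' := by rintro rfl; simp at h
    have hr : '\n' ∉ r := by simp at h; exact h.2
    simp [pvLines, hc, ih hr]

lemma pvMain (n : Nat) : ∀ (cs : List Char), cs.length ≤ n →
    (cs.foldl pvStepB ([], true)).1 =
      PySem.Chars.join ['\n'] ((pvLines cs).map pvF) := by
  induction n with
  | zero =>
    intro cs h
    have : cs = [] := List.length_eq_zero_iff.mp (Nat.le_zero.mp h)
    subst this
    simp [pvLines, pvF, PySem.Chars.lstrip, PySem.Chars.startswith, PySem.Chars.join_singleton]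
  | succ n ih =>
    intro cs h
    by_cases hm : '\n' ∈ cs
    · -- cs = l ++ '\n' :: rest with '\n' ∉ l
      obtain ⟨l, rest, hno, rfl⟩ : ∃ l rest, '\n' ∉ l ∧ cs = l ++ '\n' :: rest := by
        have hd : cs.dropWhile (· ≠ '\n') ≠ [] := by
          intro he
          have := (List.dropWhile_eq_nil_iff.mp he) '\n' hm
          simp at this
        refine ⟨cs.takeWhile (· ≠ '\n'), (cs.dropWhile (· ≠ '\n')).tail, ?_, ?_⟩
        · intro hmem
          have := List.mem_takeWhile_imp hmem
          simp at this
        · conv_lhs => rw [← List.takeWhile_append_dropWhile (p := (· ≠ '\n')) (l := cs)]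
          congr 1
          cases hdw : cs.dropWhile (· ≠ '\n') with
          | nil => exact absurd hdw hd
          | cons d t =>
            have hnotp := List.head_dropWhile_not (p := (· ≠ '\n')) hd
            simp only [hdw, List.head_cons] at hnotp
            have hdn : d = '\n' := by simpa using hnotp
            simp [hdn]
      rw [pvLines_append _ _ hno]
      have hfst := pvFold_line l hno
      rw [List.foldl_append]
      rcases hline : List.foldl pvStepB ([], true) l with ⟨outl, bl⟩
      have houtl : outl = pvF l := by rw [← hfst, hline]
      subst houtl
      have hstep : pvStepB (pvF l, bl) '\n' = (pvF l ++ ['\n'], true) := by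
        cases bl <;> simp [pvStepB]
      simp only [List.foldl_cons, hstep]
      rw [pvFold_hom rest (pvF l ++ ['\n']) true]
      have hrest : rest.length ≤ n := by
        have := h; simp [List.length_append] at this; omega
      rw [ih rest hrest]
      cases hr : pvLines rest with
      | nil => exact absurd hr (pvLines_ne_nil rest)
      | cons p ps =>
        simp only [List.map_cons, PySem.Chars.join_cons_cons]
    · rw [pvLines_no_nl cs hm]
      simp only [List.map_cons, List.map_nil, PySem.Chars.join_singleton]
      exact pvFold_line cs hm

-- A's per-line loop body appends exactly [pvF line]
lemma pvStepA_fold (L : List (List Char)) :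
    L.foldl (fun (out_lines : List (List Char)) line =>
      let stripped := PySem.Chars.lstrip line
      if PySem.Chars.startswith stripped ['#'] then
        let indent_len : Int := (PySem.Chars.len line : Int) - (PySem.Chars.len stripped : Int)
        out_lines ++ [PySem.List.slice line none (some indent_len) ++ '\\' :: stripped]
      else
        out_lines ++ [line]) [] = L.map pvF := by
  have hstep : (fun (out_lines : List (List Char)) line =>
      let stripped := PySem.Chars.lstrip line
      if PySem.Chars.startswith stripped ['#'] then
        let indent_len : Int := (PySem.Chars.len line : Int) - (PySem.Chars.len stripped : Int)
        out_lines ++ [PySem.List.slice line none (some indent_len) ++ '\\' :: stripped]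
      else
        out_lines ++ [line]) = (fun out_lines line => out_lines ++ [pvF line]) := by
    funext out_lines line
    simp only [pvF]
    split
    · have hle := pvLstrip_len_le line
      have hcast : ((PySem.Chars.len line : Int) - (PySem.Chars.len (PySem.Chars.lstrip line) : Int))
          = ((line.length - (PySem.Chars.lstrip line).length : Nat) : Int) := by
        simp only [PySem.Chars.len_eq]
        omega
      rw [hcast, PySem.List.slice_to]
      · simp
      · exact Int.natCast_nonneg _
    · rfl
  rw [hstep]
  simp
  induction L with
  | nil => simp
  | cons a t ih => simp [ih]

-- ===== VERDICT (by name: the statement is the Claim_ definition above) =====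
theorem neutralize_line_headings_py_spec : Claim_equal_neutralize_line_headings_py := by
  intro text _
  unfold Spec_neutralize_line_headings_py neutralize_line_headings_py neutralize_line_headings_py_alt
  rw [pvStepA_fold, pvSplitOn_eq_lines]
  show String.ofList (PySem.Chars.join ['\n'] ((pvLines text.toList).map pvF)) = _
  rw [← pvMain text.toList.length text.toList le_rfl]
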